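-- pv_equiv track=rewrite | github.com/odeinjul/cs61a-su19 | projects/typing_test/typing_test.py | swap_score
-- ===== SOURCE A (Python) =====
-- def swap_score(s1, s2):
--     #disregard all extra characters
--     if(not s1 or not s2):
--         return 0
--     else:
--         if(s1[0] != s2[0]):
--             return 1 + swap_score(s1[1:], s2[1:])
--         else:
--             return swap_score(s1[1:], s2[1:])
-- ===== SOURCE B (Python) =====
-- def swap_score(s1, s2):
--     count = 0
--     for c1, c2 in zip(s1, s2):
--         if c1 != c2:
--             count += 1
--     return count
-- ===== Notes on version B (the rewrite author's own statement) =====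
-- stated objective: idiomatic
-- what changed: Replaced A's recursion over string tails (repeated slicing) with a single iterative zip loop and a counter.
import Mathlib
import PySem

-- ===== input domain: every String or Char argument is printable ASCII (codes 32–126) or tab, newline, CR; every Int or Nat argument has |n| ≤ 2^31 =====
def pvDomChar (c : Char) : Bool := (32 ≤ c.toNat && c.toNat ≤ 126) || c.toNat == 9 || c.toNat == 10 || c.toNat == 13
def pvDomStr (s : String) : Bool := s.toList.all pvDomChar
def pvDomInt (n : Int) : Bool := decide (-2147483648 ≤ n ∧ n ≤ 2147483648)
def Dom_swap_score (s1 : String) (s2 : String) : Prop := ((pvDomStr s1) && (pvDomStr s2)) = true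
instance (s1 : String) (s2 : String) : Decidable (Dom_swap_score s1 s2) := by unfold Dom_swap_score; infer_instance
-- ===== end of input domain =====

-- B replaces A's recursion over string tails with a single zip loop and a counter (idiomatic iteration).


-- ===== PORT A =====
-- A's recursion: empty check, head comparison, recurse on tails (s[1:]).
def swapScoreRec : List Char → List Char → Int
  | [], _ => 0
  | _, [] => 0
  | c1 :: t1, c2 :: t2 =>
    if c1 ≠ c2 then 1 + swapScoreRec t1 t2 else swapScoreRec t1 t2

def swap_score (s1 : String) (s2 : String) : Int :=
  swapScoreRec s1.toList s2.toList

-- ===== PORT B =====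
-- B's loop: for c1, c2 in zip(s1, s2): if c1 != c2: count += 1
def swap_score_alt (s1 : String) (s2 : String) : Int :=
  (s1.toList.zip s2.toList).foldl
    (fun count p => if p.1 ≠ p.2 then count + 1 else count) 0

-- ===== PRECONDITION & SPEC =====
def Spec_swap_score (s1 : String) (s2 : String) (out : Int) : Prop := out = swap_score_alt s1 s2
instance (s1 : String) (s2 : String) (out : Int) : Decidable (Spec_swap_score s1 s2 out) := by unfold Spec_swap_score; infer_instance

-- ===== CLAIM (what is proved, stated in full; the proofs are below) =====
def Claim_equal_swap_score : Prop := ∀ (s1 : String) (s2 : String), Dom_swap_score s1 s2 → Spec_swap_score s1 s2 (swap_score s1 s2)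

-- ===== LEMMAS AND PROOFS =====
theorem swapScore_foldl (l1 l2 : List Char) (acc : Int) :
    (l1.zip l2).foldl (fun count p => if p.1 ≠ p.2 then count + 1 else count) acc
      = acc + swapScoreRec l1 l2 := by
  induction l1 generalizing l2 acc with
  | nil => simp [swapScoreRec]
  | cons c1 t1 ih =>
    cases l2 with
    | nil => simp [swapScoreRec]
    | cons c2 t2 =>
      simp only [List.zip_cons_cons, List.foldl_cons, swapScoreRec, ih]
      by_cases h : c1 = c2 <;> simp [h] <;> ring

-- ===== VERDICT (by name: the statement is the Claim_ definition above) =====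
theorem swap_score_spec : Claim_equal_swap_score := by
  intro s1 s2 _
  unfold Spec_swap_score swap_score swap_score_alt
  rw [swapScore_foldl]
  ring
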